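-- pv_equiv track=rewrite | github.com/The-Web-Dev-Forge/AlgoVault | Cryptography/views.py | format_state_to_grid
-- ===== SOURCE A (Python) =====
-- def format_state_to_grid(hex_string):
--     """Converts a 32-char hex string into a 4x4 grid of 2-char hex bytes for column-major state."""
--     grid = []
--     for i in range(4): # Rows
--         row = []
--         for j in range(4): # Columns
--             index = (j * 4 + i) * 2
--             row.append(hex_string[index:index+2])
--         grid.append(row)
--     return grid
-- ===== SOURCE B (Python) =====
-- def format_state_to_grid(hex_string):
--     bytes_ = [hex_string[2 * k:2 * k + 2] for k in range(16)]
--     chunks = [bytes_[4 * c:4 * c + 4] for c in range(4)]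
--     return [list(t) for t in zip(*chunks)]
-- ===== Notes on version B (the rewrite author's own statement) =====
-- stated objective: alternative
-- what changed: B builds a flat row-major list of the 16 two-char byte slices, chunks it into four consecutive groups, and obtains the column-major grid by transposing with zip(*chunks), instead of A's nested loops computing the column-major index (j*4+i)*2 inline.
import Mathlib
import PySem

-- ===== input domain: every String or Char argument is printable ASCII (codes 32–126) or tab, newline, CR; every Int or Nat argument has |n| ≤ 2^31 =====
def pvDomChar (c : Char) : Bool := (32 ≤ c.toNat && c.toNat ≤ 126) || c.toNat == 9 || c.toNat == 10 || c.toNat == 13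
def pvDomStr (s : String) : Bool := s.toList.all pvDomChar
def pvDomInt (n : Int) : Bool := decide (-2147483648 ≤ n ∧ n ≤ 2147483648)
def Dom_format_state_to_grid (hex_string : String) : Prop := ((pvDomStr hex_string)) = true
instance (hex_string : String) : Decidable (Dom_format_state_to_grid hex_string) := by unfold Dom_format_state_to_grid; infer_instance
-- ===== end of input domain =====

-- B replaces A's inline column-major index arithmetic by reshape-then-transpose (flat byte list, row-major chunks, zip-transpose): an alternative decomposition, same cost.
-- ===== PORT A =====
-- Port of A: nested loops over rows i and columns j, appending slice hex_string[(j*4+i)*2 : +2].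
def format_state_to_grid (hex_string : String) : List (List String) :=
  (PySem.List.pyRange 0 4 1).foldl (fun grid i =>
    grid ++ [(PySem.List.pyRange 0 4 1).foldl (fun row j =>
      row ++ [PySem.Str.slice hex_string (some ((j * 4 + i) * 2)) (some ((j * 4 + i) * 2 + 2))]) []]) []

-- ===== PORT B =====
-- pyZip ls = Python zip(*ls) on lists, mapped to lists: truncates at the shortest list.
-- fuel bounds the recursion (zip's length is at most the first list's length); it only makes the recursion total.
def pyZipFuel {α : Type} (fuel : Nat) (ls : List (List α)) : List (List α) :=
  match fuel with
  | 0 => []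
  | fuel + 1 =>
    if ls.isEmpty then []
    else
      match ls.mapM List.head? with
      | none => []
      | some hs => hs :: pyZipFuel fuel (ls.map List.tail)

def pyZip {α : Type} (ls : List (List α)) : List (List α) :=
  pyZipFuel (match ls with | [] => 0 | l :: _ => l.length) ls

-- Port of B: flat byte list, row-major chunks, transpose via zip(*chunks).
def format_state_to_grid_alt (hex_string : String) : List (List String) :=
  let bytes := (PySem.List.pyRange 0 16 1).map (fun k =>
    PySem.Str.slice hex_string (some (2 * k)) (some (2 * k + 2)))
  let chunks := (PySem.List.pyRange 0 4 1).map (fun c =>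
    PySem.List.slice bytes (some (4 * c)) (some (4 * c + 4)))
  pyZip chunks
-- ===== PRECONDITION & SPEC =====
def Spec_format_state_to_grid (hex_string : String) (out : List (List String)) : Prop := out = format_state_to_grid_alt hex_string
instance (hex_string : String) (out : List (List String)) : Decidable (Spec_format_state_to_grid hex_string out) := by unfold Spec_format_state_to_grid; infer_instance

-- ===== CLAIM (what is proved, stated in full; the proofs are below) =====
def Claim_equal_format_state_to_grid : Prop := ∀ (hex_string : String), Dom_format_state_to_grid hex_string → Spec_format_state_to_grid hex_string (format_state_to_grid hex_string)

-- ===== LEMMAS AND PROOFS =====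

-- ===== VERDICT (by name: the statement is the Claim_ definition above) =====
theorem format_state_to_grid_spec : Claim_equal_format_state_to_grid := by
  intro s _
  unfold Spec_format_state_to_grid format_state_to_grid format_state_to_grid_alt
  simp [PySem.List.pyRange, PySem.List.slice, PySem.List.clampIdx, pyZip,
        show List.range 4 = [0, 1, 2, 3] from rfl,
        show List.range 16 = [0,1,2,3,4,5,6,7,8,9,10,11,12,13,14,15] from rfl]
  norm_num [pyZipFuel]
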